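-- pv_equiv track=rewrite | github.com/josephm28/math-nerd-py | polynomial-division/terms.py | insert_missing_powers
-- ===== SOURCE A (Python) =====
-- def insert_missing_powers(terms, powers):
--     # For processing a polynomial, each term should be present
--     # Fill in the missing powers down to x^0
--     power_values = [*powers]
--     power_values.sort(reverse=True)
--     # start with the greatest power
--     greatest = power_values[0]
--     # need to go all the way to 0 as a power, so range -1
--     for power in range(greatest, -1, -1):
--         # add the power if it's not there already
--         if power not in power_values:
--             powers[power] = "0x"+str(power)
--     return powers
-- ===== SOURCE B (Python) =====
-- def insert_missing_powers(terms, powers):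
--     # Gap emission over the sorted key list: walk adjacent sorted keys and emit
--     # each gap between them (and below the smallest key, down to 0) directly,
--     # with no per-power membership test. Gaps are clamped at 0 because only
--     # nonnegative powers are filled.
--     keys = sorted(powers, reverse=True)
--     fill = []
--     for hi, lo in zip(keys, keys[1:] + [-1]):
--         fill.extend(range(hi - 1, max(lo, -1), -1))
--     for p in fill:
--         powers[p] = "0x" + str(p)
--     return powers
-- ===== Notes on version B (the rewrite author's own statement) =====
-- stated objective: faster
-- what changed: Replaces A's countdown over every power with a per-power list-membership scan by gap emission: walk adjacent pairs of the descending sorted key list and emit each run of missing powers directly (clamped at 0), so no membership test is performed at all.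
import Mathlib
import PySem

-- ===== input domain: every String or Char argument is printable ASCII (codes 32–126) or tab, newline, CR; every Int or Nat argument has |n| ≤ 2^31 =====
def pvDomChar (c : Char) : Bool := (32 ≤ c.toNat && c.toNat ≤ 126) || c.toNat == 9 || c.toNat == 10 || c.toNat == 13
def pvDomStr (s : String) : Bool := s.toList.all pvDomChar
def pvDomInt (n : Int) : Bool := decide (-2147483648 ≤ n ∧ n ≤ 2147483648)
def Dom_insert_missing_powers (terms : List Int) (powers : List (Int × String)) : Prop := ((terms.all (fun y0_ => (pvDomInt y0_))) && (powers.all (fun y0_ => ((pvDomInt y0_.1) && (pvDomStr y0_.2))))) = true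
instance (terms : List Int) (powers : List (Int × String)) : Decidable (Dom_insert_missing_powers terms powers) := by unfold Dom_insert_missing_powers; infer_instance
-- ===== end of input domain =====

-- B replaces A's per-power countdown scan (a list-membership test for every power from the
-- greatest down to 0) by gap emission over adjacent sorted keys: each run of missing powers
-- is computed directly from two neighbouring keys, with no membership test at all.
-- Both programs mutate and return the same `powers` dict; B performs the same mutation.

-- ===== PORT A =====
def insert_missing_powers (terms : List Int) (powers : List (Int × String)) : List (Int × String) :=
  -- power_values = [*powers]; power_values.sort(reverse=True); greatest = power_values[0]
  -- (IndexError on empty `powers` — excluded by Pre_)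
  match PySem.List.pyGet? (PySem.List.sorted (powers.map Prod.fst) (fun x => x) true) 0 with
  | none => powers
  | some greatest =>
    ((PySem.List.pyRange greatest (-1) (-1)).foldl
      (fun d power =>
        if (PySem.List.sorted (powers.map Prod.fst) (fun x => x) true).contains power then d
        else d.insert power ("0x" ++ PySem.Int.toStr power))
      (PySem.Dict.mk powers)).items

-- ===== PORT B =====
def insert_missing_powers_alt (terms : List Int) (powers : List (Int × String)) : List (Int × String) :=
  -- keys = sorted(powers, reverse=True)
  let keys := PySem.List.sorted (powers.map Prod.fst) (fun x => x) true
  -- for hi, lo in zip(keys, keys[1:] + [-1]): fill.extend(range(hi - 1, max(lo, -1), -1))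
  let fill := (keys.zip (PySem.List.slice keys (some 1) none ++ [-1])).foldl
      (fun acc hl => acc ++ PySem.List.pyRange (hl.1 - 1) (max hl.2 (-1)) (-1)) []
  -- for p in fill: powers[p] = "0x" + str(p)
  (fill.foldl (fun d p => d.insert p ("0x" ++ PySem.Int.toStr p)) (PySem.Dict.mk powers)).items

-- ===== PRECONDITION & SPEC =====
-- A raises IndexError on an empty dict (power_values[0]); excluded.
def Pre_insert_missing_powers (terms : List Int) (powers : List (Int × String)) : Prop :=
  powers ≠ []
instance (terms : List Int) (powers : List (Int × String)) : Decidable (Pre_insert_missing_powers terms powers) := by unfold Pre_insert_missing_powers; infer_instance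
def pvWitness_insert_missing_powers : List Int × (List (Int × String)) := ([], [((1 : Int), "2x")])

def Spec_insert_missing_powers (terms : List Int) (powers : List (Int × String)) (out : List (Int × String)) : Prop := out = insert_missing_powers_alt terms powers
instance (terms : List Int) (powers : List (Int × String)) (out : List (Int × String)) : Decidable (Spec_insert_missing_powers terms powers out) := by unfold Spec_insert_missing_powers; infer_instance

-- ===== CLAIM (what is proved, stated in full; the proofs are below) =====
def Claim_equal_insert_missing_powers : Prop := ∀ (terms : List Int) (powers : List (Int × String)), Dom_insert_missing_powers terms powers → Pre_insert_missing_powers terms powers → Spec_insert_missing_powers terms powers (insert_missing_powers terms powers)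

-- ===== LEMMAS AND PROOFS =====

-- Gap emission over a descending key list equals filtering the missing powers out of
-- the full countdown range from its head.
theorem pyRange_clamp (k : Int) :
    PySem.List.pyRange (max k (-1)) (-1) (-1) = PySem.List.pyRange k (-1) (-1) := by
  by_cases h : (-1 : Int) ≤ k
  · rw [max_eq_left h]
  · rw [max_eq_right (by omega), PySem.List.pyRange_neg_one_eq_nil le_rfl,
      PySem.List.pyRange_neg_one_eq_nil (by omega)]

theorem gaps_eq_filter : ∀ (t : List Int) (m : Int),
    (m :: t).Pairwise (fun a b => b ≤ a) →
    ((m :: t).zip (t ++ [-1])).flatMap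
        (fun hl => PySem.List.pyRange (hl.1 - 1) (max hl.2 (-1)) (-1))
      = (PySem.List.pyRange m (-1) (-1)).filter (fun p => !((m :: t).contains p)) := by
  intro t
  induction t with
  | nil =>
    intro m _
    simp only [List.nil_append, List.zip_cons_cons, List.zip_nil_right, List.flatMap_cons,
      List.flatMap_nil, List.append_nil, max_self]
    by_cases hm : (0 : Int) ≤ m
    · have hR : PySem.List.pyRange m (-1) (-1) = m :: PySem.List.pyRange (m - 1) (-1) (-1) :=
        PySem.List.pyRange_neg_one_cons (by omega)
      rw [hR, List.filter_cons]
      have hc : ¬ ((fun p => !(([m] : List Int).contains p)) m = true) := by simp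
      rw [if_neg hc]
      refine (List.filter_eq_self.mpr ?_).symm
      intro p hp
      have hb := (PySem.List.mem_pyRange_neg_one).mp hp
      have : p ≠ m := by omega
      simp [this]
    · rw [PySem.List.pyRange_neg_one_eq_nil (by omega : m - 1 ≤ -1),
        PySem.List.pyRange_neg_one_eq_nil (by omega : m ≤ -1)]
      simp
  | cons k t' ih =>
    intro m hpw
    have hmk : k ≤ m := (List.pairwise_cons.mp hpw).1 k (by simp)
    have hpw' : (k :: t').Pairwise (fun a b => b ≤ a) := (List.pairwise_cons.mp hpw).2
    have ht' : ∀ x ∈ t', x ≤ k := (List.pairwise_cons.mp hpw').1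
    simp only [List.cons_append, List.zip_cons_cons, List.flatMap_cons]
    rw [ih k hpw']
    by_cases hm : (0 : Int) ≤ m
    · have hk1 : max k (-1) ≤ m := by rcases max_cases k (-1) with ⟨h1,_⟩|⟨h1,_⟩ <;> omega
      have hk2 : (-1 : Int) ≤ max k (-1) := le_max_right k (-1)
      have hsplit : PySem.List.pyRange m (-1) (-1)
          = PySem.List.pyRange m (max k (-1)) (-1) ++ PySem.List.pyRange (max k (-1)) (-1) (-1) := by
        rw [PySem.List.pyRange_neg_one_eq_reverse m (-1),
          PySem.List.pyRange_neg_one_eq_reverse m (max k (-1)),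
          PySem.List.pyRange_neg_one_eq_reverse (max k (-1)) (-1),
          ← List.reverse_append,
          ← PySem.List.pyRange_one_append (-1 + 1) (max k (-1) + 1) (m + 1) (by omega) (by omega)]
      rw [hsplit, List.filter_append]
      congr 1
      · -- gap between m and the next key
        by_cases hlt : max k (-1) < m
        · have hR : PySem.List.pyRange m (max k (-1)) (-1)
              = m :: PySem.List.pyRange (m - 1) (max k (-1)) (-1) :=
            PySem.List.pyRange_neg_one_cons hlt
          rw [hR, List.filter_cons]
          have hc : ¬ ((fun p => !((m :: k :: t').contains p)) m = true) := by simp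
          rw [if_neg hc]
          refine (List.filter_eq_self.mpr ?_).symm
          intro p hp
          have hb := (PySem.List.mem_pyRange_neg_one).mp hp
          have h1 : p ≠ m := by omega
          have h2 : p ≠ k := by rcases max_cases k (-1) with ⟨h3,_⟩|⟨h3,_⟩ <;> omega
          have h3 : p ∉ t' := fun hx => absurd (ht' p hx)
            (by rcases max_cases k (-1) with ⟨h4,_⟩|⟨h4,_⟩ <;> omega)
          simp [h1, h2, h3]
        · have heq : max k (-1) = m := le_antisymm hk1 (not_lt.mp hlt)
          rw [heq, PySem.List.pyRange_neg_one_eq_nil le_rfl,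
            PySem.List.pyRange_neg_one_eq_nil (by omega : m - 1 ≤ m), List.filter_nil]
      · -- below the next key: drop m from the membership list
        rw [pyRange_clamp]
        refine (List.filter_congr ?_).symm
        intro p hp
        have hb := (PySem.List.mem_pyRange_neg_one).mp hp
        by_cases hpm : p = m
        · have hkm : k = m := by omega
          subst hpm
          simp [hkm.symm]
        · simp [hpm]
    · rw [PySem.List.pyRange_neg_one_eq_nil (by omega : m ≤ -1),
        PySem.List.pyRange_neg_one_eq_nil
          (show m - 1 ≤ max k (-1) from by rcases max_cases k (-1) with ⟨h1,_⟩|⟨h1,_⟩ <;> omega),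
        PySem.List.pyRange_neg_one_eq_nil (by omega : k ≤ -1)]
      simp

theorem insert_missing_powers_eq (terms : List Int) (powers : List (Int × String))
    (hne : powers ≠ []) :
    insert_missing_powers terms powers = insert_missing_powers_alt terms powers := by
  unfold insert_missing_powers insert_missing_powers_alt
  have hkne : powers.map Prod.fst ≠ [] := by
    intro h; exact hne (List.map_eq_nil_iff.mp h)
  obtain ⟨m, t, hst⟩ : ∃ m t,
      PySem.List.sorted (powers.map Prod.fst) (fun x => x) true = m :: t := by
    cases hs : PySem.List.sorted (powers.map Prod.fst) (fun x => x) true with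
    | nil => exact absurd ((PySem.List.sorted_eq_nil_iff _ _ _).mp hs) hkne
    | cons a b => exact ⟨a, b, rfl⟩
  have hpw : (m :: t).Pairwise (fun a b => b ≤ a) := by
    have := PySem.List.sorted_pairwise_rev (powers.map Prod.fst) (fun x => x)
    rw [hst] at this
    exact this
  rw [hst]
  simp only [PySem.List.pyGet?_zero_cons, PySem.List.slice_from_one, List.tail_cons]
  -- A's loop: skip present powers = fold over the filtered countdown
  have hfun : (fun (d : PySem.Dict Int String) power =>
      if (m :: t).contains power then d
      else d.insert power ("0x" ++ PySem.Int.toStr power))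
      = (fun (d : PySem.Dict Int String) power =>
      if (!((m :: t).contains power)) = true then d.insert power ("0x" ++ PySem.Int.toStr power)
      else d) := by
    funext d power
    cases (m :: t).contains power <;> simp
  rw [hfun, PySem.List.foldl_if_eq_foldl_filter]
  -- B's fill loop is the flatMap of the gap ranges
  rw [PySem.List.foldl_append_eq_flatMap, List.nil_append, gaps_eq_filter t m hpw]

-- ===== VERDICT (by name: the statement is the Claim_ definition above) =====
theorem insert_missing_powers_spec : Claim_equal_insert_missing_powers := by
  intro terms powers _ hpre
  unfold Spec_insert_missing_powers
  exact insert_missing_powers_eq terms powers hpre
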